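-- pv_equiv track=rewrite | github.com/Hymavathy/InformationRetreivalSearchEngine | porter_stemming.py | count_measure
-- ===== SOURCE A (Python) =====
-- def count_measure(word):
--     count = 0
--     prev_char_vowel = False
--
--     for char in word:
--         if char in "aeiou":
--             if not prev_char_vowel:
--                 count += 1
--             prev_char_vowel = True
--         else:
--             prev_char_vowel = False
--
--     return count
-- ===== SOURCE B (Python) =====
-- def count_measure(word):
--     # A vowel run starts exactly at a vowel position whose predecessor index
--     # is not a vowel position: count = |V - (V + 1)| where V = vowel indices.
--     vowel_pos = {i for i, c in enumerate(word) if c in "aeiou"}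
--     return len(vowel_pos - {i + 1 for i in vowel_pos})
-- ===== Notes on version B (the rewrite author's own statement) =====
-- stated objective: alternative
-- what changed: Replaces A's sequential prev-flag state machine with set arithmetic: build the set V of vowel indices and return |V - (V+1)|, the vowel positions whose predecessor is not a vowel.
import Mathlib
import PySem

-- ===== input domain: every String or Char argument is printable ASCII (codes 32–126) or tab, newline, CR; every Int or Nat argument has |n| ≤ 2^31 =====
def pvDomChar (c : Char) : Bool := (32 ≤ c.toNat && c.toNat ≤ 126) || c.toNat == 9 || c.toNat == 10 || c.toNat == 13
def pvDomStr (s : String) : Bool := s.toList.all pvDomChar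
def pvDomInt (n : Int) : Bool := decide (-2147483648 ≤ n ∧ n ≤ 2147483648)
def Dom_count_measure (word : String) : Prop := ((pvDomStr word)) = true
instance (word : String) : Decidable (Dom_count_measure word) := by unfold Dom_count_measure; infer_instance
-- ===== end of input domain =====

-- B replaces A's sequential prev-flag state machine with set arithmetic: |V - (V+1)| over the set V of vowel indices (alternative decomposition, not faster).


-- ===== PORT A =====
-- A's loop: fold over the characters with state (count, prev_char_vowel)
def count_measure (word : String) : Int :=
  (word.toList.foldl
    (fun (st : Int × Bool) (char : Char) =>
      if char ∈ "aeiou".toList then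
        ((if !st.2 then st.1 + 1 else st.1), true)
      else
        (st.1, false))
    ((0 : Int), false)).1

-- ===== PORT B =====
-- B: set of vowel indices, minus the same set shifted by one, then its size
def count_measure_alt (word : String) : Int :=
  let vowelPos : PySem.Set Int :=
    PySem.Set.ofList ((PySem.List.enumerate word.toList).filterMap
      (fun p => if p.2 ∈ "aeiou".toList then some p.1 else none))
  let shifted : PySem.Set Int := PySem.Set.ofList (vowelPos.map (· + 1))
  PySem.Set.len (PySem.Set.diff vowelPos shifted)

-- ===== PRECONDITION & SPEC =====
def Spec_count_measure (word : String) (out : Int) : Prop := out = count_measure_alt word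
instance (word : String) (out : Int) : Decidable (Spec_count_measure word out) := by unfold Spec_count_measure; infer_instance

-- ===== CLAIM (what is proved, stated in full; the proofs are below) =====
def Claim_equal_count_measure : Prop := ∀ (word : String), Dom_count_measure word → Spec_count_measure word (count_measure word)

-- ===== LEMMAS AND PROOFS =====

-- spec function: count of vowel-run starts in a flag list, given previous flag
def pvF : List Bool → Bool → Int
  | [], _ => 0
  | b :: t, prev => (if b && !prev then 1 else 0) + pvF t b

-- vowel-index list of a flag list (indices relative to the start)
def pvV : List Bool → List Int
  | [] => []
  | b :: t => (if b then [(0 : Int)] else []) ++ (pvV t).map (· + 1)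

theorem pvFoldA_eq (cs : List Char) : ∀ (c0 : Int) (prev : Bool),
    (cs.foldl
      (fun (st : Int × Bool) (char : Char) =>
        if char ∈ "aeiou".toList then
          ((if !st.2 then st.1 + 1 else st.1), true)
        else
          (st.1, false))
      (c0, prev)).1
    = c0 + pvF (cs.map (fun c => c ∈ "aeiou".toList)) prev := by
  induction cs with
  | nil => intro c0 prev; simp only [List.foldl_nil, List.map_nil, pvF, add_zero]
  | cons c t ih =>
    intro c0 prev
    simp only [List.foldl_cons, List.map_cons]
    by_cases h : c ∈ "aeiou".toList
    · rw [if_pos h, decide_eq_true h]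
      cases prev <;> simp only [Bool.not_false, Bool.not_true, if_true, ih] <;>
        (simp [pvF]; try ring)
    · rw [if_neg h, decide_eq_false h]
      cases prev <;> (rw [ih]; simp [pvF])

theorem pvV_nonneg (t : List Bool) : ∀ i ∈ pvV t, 0 ≤ i := by
  induction t with
  | nil => simp [pvV]
  | cons b t ih =>
    intro i hi
    simp only [pvV, List.mem_append, List.mem_map] at hi
    rcases hi with hi | ⟨j, hj, rfl⟩
    · cases b <;> simp_all
    · have := ih j hj; omega

theorem pvV_nodup (t : List Bool) : (pvV t).Nodup := by
  induction t with
  | nil => simp [pvV]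
  | cons b t ih =>
    simp only [pvV]
    apply List.Nodup.append
    · cases b <;> simp
    · exact ih.map (fun a b h => by omega)
    · intro i hi hj
      have h0 : i = 0 := by cases b <;> simp_all
      subst h0
      rcases List.mem_map.mp hj with ⟨k, hk, hke⟩
      have := pvV_nonneg t k hk
      omega

-- ofList is the identity on a Nodup list
theorem pv_ofList_nodup {α : Type} [BEq α] [LawfulBEq α] (xs : List α) (h : xs.Nodup) :
    PySem.Set.ofList xs = xs := by
  suffices H : ∀ (xs acc : List α), (acc ++ xs).Nodup →
      xs.foldl PySem.Set.add acc = acc ++ xs by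
    simpa using H xs [] (by simpa using h)
  intro xs
  induction xs with
  | nil => intro acc _; simp
  | cons x t ih =>
    intro acc hn
    have hx : PySem.Set.contains acc x = false := by
      rw [PySem.Set.contains, List.contains_eq_mem, decide_eq_false_iff_not]
      intro hmem
      have := List.disjoint_of_nodup_append hn
      exact this hmem (by simp)
    rw [List.foldl_cons, PySem.Set.add, hx]
    simp only [Bool.false_eq_true, if_false]
    rw [ih (acc ++ [x]) (by simpa using hn)]
    simp

-- shifting a mapped index list
theorem pv_map_shift (l : List Int) (s : Int) :
    (l.map (· + 1)).map (· + s) = l.map (· + (s + 1)) := by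
  rw [List.map_map]
  congr 1
  funext x
  simp only [Function.comp]
  ring

-- the B-side comprehension over enumerate produces pvV of the flag list (shifted by the start)
theorem pv_enum_eq (cs : List Char) : ∀ (s : Int),
    (PySem.List.enumerate cs s).filterMap
      (fun p => if p.2 ∈ "aeiou".toList then some p.1 else none)
    = (pvV (cs.map (fun c => decide (c ∈ "aeiou".toList)))).map (· + s) := by
  induction cs with
  | nil => intro s; simp [PySem.List.enumerate_nil, pvV]
  | cons c t ih =>
    intro s
    rw [PySem.List.enumerate_cons, List.filterMap_cons]
    by_cases h : c ∈ "aeiou".toList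
    · simp only [if_pos h, List.map_cons, decide_eq_true h, pvV, ih (s + 1)]
      rw [List.map_append, pv_map_shift]
      simp
    · simp only [if_neg h, List.map_cons, decide_eq_false h, pvV,
        Bool.false_eq_true, if_false, List.nil_append, ih (s + 1)]
      rw [pv_map_shift]

-- counting function over pvV: run starts relative to a previous flag
theorem pv_count_eq (t : List Bool) : ∀ (prev : Bool),
    pvF t prev
    = (((pvV t).filter
        (fun i => !((pvV t).contains (i - 1)) && !(prev && (i == 0)))).length : Int) := by
  induction t with
  | nil => intro prev; simp [pvF, pvV]
  | cons b t ih =>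
    intro prev
    simp only [pvV]
    rw [List.filter_append]
    have hhead : ((if b = true then [(0 : Int)] else []).filter
        (fun i => !(((if b = true then [(0 : Int)] else []) ++ (pvV t).map (· + 1)).contains (i - 1))
          && !(prev && (i == 0)))).length
        = if b && !prev then 1 else 0 := by
      cases b
      · cases prev <;> simp
      · cases prev <;> simp [List.filter_cons, -List.contains_eq_mem] <;>
          try (rw [if_pos (show ∀ x ∈ pvV t, ¬ (-1 : Int) = x + 1 from
            fun x hx h => by have := pvV_nonneg t x hx; omega)]; rfl)
    have hpred : ∀ j ∈ (pvV t).map (· + 1),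
        (!(((if b = true then [(0 : Int)] else []) ++ (pvV t).map (· + 1)).contains (j - 1))
          && !(prev && (j == 0)))
        = (!((pvV t).contains (j - 2)) && !(b && (j - 1 == 0))) := by
      intro j hj
      rcases List.mem_map.mp hj with ⟨k, hk, hke⟩
      have hk0 : 0 ≤ k := pvV_nonneg t k hk
      subst hke
      have e1 : (k + 1 - 1 : Int) = k := by ring
      have e2 : (k + 1 - 2 : Int) = k - 1 := by ring
      have e3 : ((k + 1 : Int) == 0) = false := by
        rw [beq_eq_false_iff_ne]; omega
      rw [e1, e2, e3]
      have hmemL : k ∈ (if b = true then [(0 : Int)] else []) ++ (pvV t).map (· + 1)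
          ↔ ((b = true ∧ k = 0) ∨ (k - 1 ∈ pvV t)) := by
        simp only [List.mem_append, List.mem_map]
        constructor
        · rintro (h | ⟨a, ha, hae⟩)
          · left; cases b <;> simp_all
          · right; have : a = k - 1 := by omega
            subst this; exact ha
        · rintro (⟨hb, rfl⟩ | h)
          · left; simp [hb]
          · right; exact ⟨k - 1, h, by ring⟩
      have hc : ((if b = true then [(0 : Int)] else []) ++ (pvV t).map (· + 1)).contains k
          = ((b && (k == 0)) || (pvV t).contains (k - 1)) := by
        rw [List.contains_eq_mem, List.contains_eq_mem]
        have hd : decide (k ∈ (if b = true then [(0 : Int)] else []) ++ (pvV t).map (· + 1))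
            = decide ((b = true ∧ k = 0) ∨ (k - 1 ∈ pvV t)) := by
          rw [decide_eq_decide]; exact hmemL
        rw [hd]
        cases b <;> by_cases h2 : k = 0 <;> by_cases h3 : (k - 1 ∈ pvV t) <;> simp [h2, h3]
      rw [hc]
      cases hb : (b && (k == 0)) <;> cases hcc : (pvV t).contains (k - 1) <;>
        cases prev <;> simp_all
    rw [List.filter_congr hpred, List.filter_map]
    have hcomp : ((fun j => !((pvV t).contains (j - 2)) && !(b && (j - 1 == 0))) ∘ (· + 1))
        = (fun i => !((pvV t).contains (i - 1)) && !(b && (i == 0))) := by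
      funext k
      simp only [Function.comp]
      rw [show (k + 1 - 2 : Int) = k - 1 by ring, show (k + 1 - 1 : Int) = k by ring]
    rw [hcomp]
    rw [show pvF (b :: t) prev = (if b && !prev then 1 else 0) + pvF t b from rfl, ih b]
    simp only [List.length_append, List.length_map, hhead]
    push_cast
    ring

-- ===== VERDICT (by name: the statement is the Claim_ definition above) =====
theorem count_measure_spec : Claim_equal_count_measure := by
  intro word _
  unfold Spec_count_measure count_measure count_measure_alt
  rw [pvFoldA_eq]
  simp only [zero_add]
  rw [show (fun c => (c ∈ "aeiou".toList : Bool)) = (fun c => decide (c ∈ "aeiou".toList)) from rfl]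
  rw [pv_enum_eq word.toList 0]
  set flags := word.toList.map (fun c => decide (c ∈ "aeiou".toList)) with hflags
  have hmap0 : (pvV flags).map (· + (0 : Int)) = pvV flags := by simp
  rw [hmap0, pv_ofList_nodup _ (pvV_nodup flags),
      pv_ofList_nodup _ ((pvV_nodup flags).map (fun a b h => by omega))]
  rw [pv_count_eq flags false]
  unfold PySem.Set.len PySem.Set.diff PySem.Set.contains
  congr 2
  apply List.filter_congr
  intro i _
  simp only [Bool.false_and, Bool.not_false, Bool.and_true]
  congr 1
  rw [List.contains_eq_mem, List.contains_eq_mem]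
  rw [decide_eq_decide]
  have hiff : (i ∈ (pvV flags).map (· + 1)) ↔ ((i - 1) ∈ pvV flags) := by
    rw [List.mem_map]
    constructor
    · rintro ⟨j, hj, hje⟩
      have hj' : j = i - 1 := by omega
      rwa [hj'] at hj
    · intro h
      exact ⟨i - 1, h, by ring⟩
  first
    | exact hiff
    | exact hiff.symm
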